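-- pv_equiv track=rewrite | github.com/MikeGolden/AdventOfCode2025 | day6/part2.py | split_blocks
-- ===== SOURCE A (Python) =====
-- from typing import List
--
-- def split_blocks(lines: List[str]) -> List[List[str]]:
--     width = max(len(line) for line in lines)
--     padded = [line.ljust(width) for line in lines]
--
--     used = [any(row[c] != " " for row in padded) for c in range(width)]
--
--     blocks = []
--     start = None
--
--     for i, active in enumerate(used + [False]):
--         if active and start is None:
--             start = i
--         elif not active and start is not None:
--             blocks.append([row[start:i] for row in padded])
--             start = None
--
--     return blocks
-- ===== SOURCE B (Python) =====
-- from typing import List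
--
-- def split_blocks(lines: List[str]) -> List[List[str]]:
--     width = max(len(line) for line in lines)
--     padded = [line.ljust(width) for line in lines]
--
--     def blank(c):
--         return all(row[c] == " " for row in padded)
--
--     blocks = []
--     c = 0
--     while c < width:
--         if blank(c):
--             c += 1
--         else:
--             end = c
--             while end < width and not blank(end):
--                 end += 1
--             blocks.append([row[c:end] for row in padded])
--             c = end
--     return blocks
-- ===== Notes on version B (the rewrite author's own statement) =====
-- stated objective: simpler
-- what changed: Replaced the precomputed column mask with appended False sentinel and the Optional start state machine by a direct two-pointer scan over column indices: skip blank columns, advance an inner loop to the end of each active run, and slice the block out immediately.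
import Mathlib
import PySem

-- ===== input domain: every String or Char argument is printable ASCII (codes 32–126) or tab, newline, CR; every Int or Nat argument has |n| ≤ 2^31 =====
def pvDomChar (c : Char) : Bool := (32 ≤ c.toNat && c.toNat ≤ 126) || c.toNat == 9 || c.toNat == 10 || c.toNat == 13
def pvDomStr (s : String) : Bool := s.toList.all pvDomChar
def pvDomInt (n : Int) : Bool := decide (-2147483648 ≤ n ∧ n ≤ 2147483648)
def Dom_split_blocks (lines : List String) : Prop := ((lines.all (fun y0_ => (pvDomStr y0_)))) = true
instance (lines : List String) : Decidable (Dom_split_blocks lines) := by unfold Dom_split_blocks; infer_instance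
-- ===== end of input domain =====

-- B replaces A's column mask + sentinel + Optional-start state machine by a direct
-- two-pointer scan over column indices (objective: simpler).

-- ===== PORT A =====
-- width = max(len(line) for line in lines); Pre_ excludes lines = [] (ValueError of max())
-- line.ljust(width): pad with spaces up to width; exact since padding with replicate matches
-- Python ljust for any width (clamped subtraction = no padding when already long enough).
-- row[c] for c in range(width): always in range (every row has length ≥ width after ljust is ≥?
-- rows have length exactly max ≥ width? rows have length max(len) = width), so pyGet?.getD ' '
-- is exact (the default is never used).
def split_blocks (lines : List String) : List (List String) :=
  let width := ((lines.map (fun line => line.toList.length)).max?).getD 0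
  let padded := lines.map (fun line => line.toList ++ List.replicate (width - line.toList.length) ' ')
  let used := (List.range width).map (fun c : Nat => padded.any (fun row => ((PySem.List.pyGet? row (c : Int)).getD ' ') != ' '))
  let step := fun (st : List (List String) × Option Int) (ia : Int × Bool) =>
    if ia.2 && st.2.isNone then (st.1, some ia.1)
    else if !ia.2 && st.2.isSome then
      (st.1 ++ [padded.map (fun row => String.ofList (PySem.List.slice row (some (st.2.getD 0)) (some ia.1)))], none)
    else st
  ((PySem.List.enumerate (used ++ [false]) 0).foldl step ([], none)).1

-- ===== PORT B =====
-- blank(c) = all(row[c] == " " for row in padded); row[c] always in range as above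
def pvBlank (padded : List (List Char)) (c : Nat) : Bool :=
  padded.all (fun row => ((PySem.List.pyGet? row (c : Int)).getD ' ') == ' ')

-- inner while: end = c; while end < width and not blank(end): end += 1
def pvScanEnd (padded : List (List Char)) (width e : Nat) : Nat :=
  if e < width && !pvBlank padded e then pvScanEnd padded width (e + 1) else e
termination_by width - e
decreasing_by simp_all; omega

theorem pvScanEnd_ge (padded : List (List Char)) (width e : Nat) :
    e ≤ pvScanEnd padded width e := by
  unfold pvScanEnd
  split
  · exact Nat.le_trans (Nat.le_succ e) (pvScanEnd_ge padded width (e + 1))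
  · exact Nat.le_refl e
termination_by width - e
decreasing_by simp_all; omega

theorem pvScanEnd_gt (padded : List (List Char)) (width c : Nat)
    (h1 : c < width) (h2 : pvBlank padded c = false) :
    c < pvScanEnd padded width c := by
  rw [pvScanEnd]
  simp [h1, h2]
  exact pvScanEnd_ge padded width (c + 1)

-- outer while over column index c
def pvLoopB (padded : List (List Char)) (width c : Nat) (blocks : List (List String)) :
    List (List String) :=
  if _h : c < width then
    if hb : pvBlank padded c then pvLoopB padded width (c + 1) blocks
    else
      let e := pvScanEnd padded width c
      pvLoopB padded width e
        (blocks ++ [padded.map (fun row => String.ofList (PySem.List.slice row (some (c : Int)) (some (e : Int))))])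
  else blocks
termination_by width - c
decreasing_by
  · omega
  · have := pvScanEnd_gt padded width c _h (by simpa using hb); omega

def split_blocks_alt (lines : List String) : List (List String) :=
  let width := ((lines.map (fun line => line.toList.length)).max?).getD 0
  let padded := lines.map (fun line => line.toList ++ List.replicate (width - line.toList.length) ' ')
  pvLoopB padded width 0 []

-- ===== PRECONDITION & SPEC =====
-- Pre_ excludes only the empty list, on which Python's max() raises ValueError in both A and B.
def Pre_split_blocks (lines : List String) : Prop := lines ≠ []
instance (lines : List String) : Decidable (Pre_split_blocks lines) := by unfold Pre_split_blocks; infer_instance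
def pvWitness_split_blocks : List String := (["ab c", " x"])
def Spec_split_blocks (lines : List String) (out : List (List String)) : Prop := out = split_blocks_alt lines
instance (lines : List String) (out : List (List String)) : Decidable (Spec_split_blocks lines out) := by unfold Spec_split_blocks; infer_instance

-- ===== CLAIM (what is proved, stated in full; the proofs are below) =====
def Claim_equal_split_blocks : Prop := ∀ (lines : List String), Dom_split_blocks lines → Pre_split_blocks lines → Spec_split_blocks lines (split_blocks lines)

-- ===== LEMMAS AND PROOFS =====

-- the run intervals produced by A's state machine, as a recursive function
def mkInt : List Bool → Int → Option Int → List (Int × Int)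
  | [], _, _ => []
  | b :: bs, i, none => if b then mkInt bs (i + 1) (some i) else mkInt bs (i + 1) none
  | b :: bs, i, some s => if b then mkInt bs (i + 1) (some s) else (s, i) :: mkInt bs (i + 1) none

def pvBlockOf (padded : List (List Char)) (s e : Int) : List String :=
  padded.map (fun row => String.ofList (PySem.List.slice row (some s) (some e)))

-- A's fold computes blocks ++ blocks-of-intervals
theorem foldA_eq (padded : List (List Char)) (bs : List Bool) (i : Int)
    (blocks : List (List String)) (st : Option Int) :
    ((PySem.List.enumerate bs i).foldl
      (fun (st : List (List String) × Option Int) (ia : Int × Bool) =>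
        if ia.2 && st.2.isNone then (st.1, some ia.1)
        else if !ia.2 && st.2.isSome then
          (st.1 ++ [padded.map (fun row => String.ofList (PySem.List.slice row (some (st.2.getD 0)) (some ia.1)))], none)
        else st)
      (blocks, st)).1
    = blocks ++ (mkInt bs i st).map (fun p => pvBlockOf padded p.1 p.2) := by
  induction bs generalizing i blocks st with
  | nil => simp [PySem.List.enumerate_nil, mkInt]
  | cons b bs ih =>
    rw [PySem.List.enumerate_cons, List.foldl_cons]
    cases st with
    | none =>
      cases b
      · exact ih (i + 1) blocks none
      · exact ih (i + 1) blocks (some i)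
    | some s =>
      cases b
      · have h := ih (i + 1)
          (blocks ++ [padded.map (fun row => String.ofList (PySem.List.slice row (some s) (some i)))]) none
        simpa [mkInt, pvBlockOf] using h
      · exact ih (i + 1) blocks (some s)

theorem mkInt_some (padded : List (List Char)) (width : Nat) :
    ∀ (n c : Nat) (s : Int), c + n = width →
    mkInt ((List.range' c n).map (fun c => !pvBlank padded c) ++ [false]) (c : Int) (some s)
      = (s, (pvScanEnd padded width c : Int))
        :: mkInt ((List.range' (pvScanEnd padded width c) (width - pvScanEnd padded width c)).map
            (fun c => !pvBlank padded c) ++ [false]) ((pvScanEnd padded width c : Int)) none := by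
  intro n
  induction n with
  | zero =>
    intro c s h
    have hc : c = width := by omega
    subst hc
    rw [pvScanEnd]
    simp [mkInt]
  | succ n ih =>
    intro c s h
    rw [List.range'_succ]
    cases hb : pvBlank padded c with
    | false =>
      have hstep : pvScanEnd padded width c = pvScanEnd padded width (c + 1) := by
        rw [pvScanEnd]; simp [hb]; omega
      simp only [List.map_cons, hb, Bool.not_false, List.cons_append, mkInt, if_pos]
      rw [hstep]
      have := ih (c + 1) s (by omega)
      push_cast at this ⊢
      simpa using this
    | true =>
      have hstop : pvScanEnd padded width c = c := by
        rw [pvScanEnd]; simp [hb]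
      simp only [List.map_cons, hb, Bool.not_true, List.cons_append, mkInt]
      rw [hstop]
      have hw : width - c = n + 1 := by omega
      rw [hw, List.range'_succ]
      simp [mkInt, hb]

theorem loopB_eq (padded : List (List Char)) (width : Nat) :
    ∀ (n c : Nat) (blocks : List (List String)), c + n = width →
    pvLoopB padded width c blocks
      = blocks ++ (mkInt ((List.range' c n).map (fun c => !pvBlank padded c) ++ [false]) (c : Int) none).map
          (fun p => pvBlockOf padded p.1 p.2) := by
  intro n
  induction n using Nat.strong_induction_on with
  | _ n ih =>
    intro c blocks h
    cases n with
    | zero =>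
      have hc : c = width := by omega
      rw [pvLoopB]
      simp [hc, mkInt]
    | succ n =>
      rw [pvLoopB, dif_pos (by omega : c < width), List.range'_succ]
      cases hb : pvBlank padded c with
      | true =>
        rw [dif_pos rfl]
        have := ih n (by omega) (c + 1) blocks (by omega)
        simp only [List.map_cons, hb, Bool.not_true, List.cons_append, mkInt]
        push_cast at this ⊢
        simpa using this
      | false =>
        rw [dif_neg (by simp)]
        simp only [List.map_cons, hb, Bool.not_false, List.cons_append, mkInt, if_pos]
        have hmk := mkInt_some padded width (n) (c + 1) (c : Int) (by omega)
        push_cast at hmk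
        rw [hmk]
        have hgt : c < pvScanEnd padded width c := pvScanEnd_gt padded width c (by omega) hb
        have hstep : pvScanEnd padded width c = pvScanEnd padded width (c + 1) := by
          rw [pvScanEnd]; simp [hb]; omega
        have hle : pvScanEnd padded width (c + 1) ≤ width := by
          have h2 : ∀ m e, width - e = m → e ≤ width → pvScanEnd padded width e ≤ width := by
            intro m
            induction m with
            | zero =>
              intro e he hew
              rw [pvScanEnd]
              split
              · next hcond =>
                simp only [Bool.and_eq_true, decide_eq_true_eq] at hcond
                omega
              · exact hew
            | succ m ihm =>
              intro e he hew
              rw [pvScanEnd]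
              split
              · next hcond =>
                simp only [Bool.and_eq_true, decide_eq_true_eq] at hcond
                exact ihm (e + 1) (by omega) (by omega)
              · exact hew
          exact h2 (width - (c + 1)) (c + 1) rfl (by omega)
        have := ih (width - pvScanEnd padded width (c + 1)) (by omega)
          (pvScanEnd padded width (c + 1))
          (blocks ++ [padded.map (fun row => String.ofList (PySem.List.slice row (some (c : Int)) (some ((pvScanEnd padded width c : Nat) : Int))))])
          (by omega)
        rw [← hstep] at this ⊢
        rw [this]
        simp [pvBlockOf]

-- A's used-mask entry is the negation of B's blank test
theorem used_eq_not_blank (padded : List (List Char)) :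
    (fun c : Nat => padded.any (fun row => ((PySem.List.pyGet? row (c : Int)).getD ' ') != ' '))
      = (fun c : Nat => !pvBlank padded c) := by
  funext c
  unfold pvBlank
  simp [bne, List.not_all_eq_any_not]

-- ===== VERDICT (by name: the statement is the Claim_ definition above) =====
theorem split_blocks_spec : Claim_equal_split_blocks := by
  intro lines _ _
  unfold Spec_split_blocks split_blocks split_blocks_alt
  simp only []
  set width := ((lines.map (fun line => line.toList.length)).max?).getD 0 with hw
  set padded := lines.map (fun line => line.toList ++ List.replicate (width - line.toList.length) ' ') with hp
  rw [foldA_eq padded]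
  rw [loopB_eq padded width width 0 [] (by omega)]
  rw [List.range_eq_range']
  rw [used_eq_not_blank padded]
  simp
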